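-- pv_equiv track=rewrite | github.com/togzhanberikbolova/pp2_Togzhan | TSIS5/TSIS4/generators/3.py | Divisible
-- ===== SOURCE A (Python) =====
-- def Divisible(n):
--     if n<0:
--         return ValueError("Error")
--     for i in range(n+1):
--         if i%3 == 0:
--             yield i
--         elif i%4 == 0:
--             yield i
-- ===== SOURCE B (Python) =====
-- def Divisible(n):
--     if n < 0:
--         return ValueError("Error")
--     a = 0
--     b = 0
--     while a <= n or b <= n:
--         if a == b:
--             yield a
--             a += 3
--             b += 4
--         elif a < b:
--             yield a
--             a += 3
--         else:
--             yield b
--             b += 4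
-- ===== Notes on version B (the rewrite author's own statement) =====
-- stated objective: faster
-- what changed: B replaces A's scan over every integer in the range (testing each for divisibility) by a two-counter merge that steps directly through the multiples of three and of four, yielding the smaller at each step and advancing both on ties (multiples of twelve).
import Mathlib
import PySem

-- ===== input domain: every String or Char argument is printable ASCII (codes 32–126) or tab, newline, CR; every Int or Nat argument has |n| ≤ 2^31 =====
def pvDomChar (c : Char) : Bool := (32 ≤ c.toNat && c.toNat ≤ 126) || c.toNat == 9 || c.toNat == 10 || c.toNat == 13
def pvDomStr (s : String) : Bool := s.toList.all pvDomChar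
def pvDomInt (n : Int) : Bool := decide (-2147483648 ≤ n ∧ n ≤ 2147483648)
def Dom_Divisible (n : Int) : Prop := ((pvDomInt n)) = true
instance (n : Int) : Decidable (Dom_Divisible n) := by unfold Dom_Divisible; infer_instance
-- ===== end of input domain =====

-- B replaces the scan over every i in the range by a two-counter merge of the
-- multiples of three and of four (measurably faster by a constant factor; same output list).
-- A is a generator; for n < 0 it yields nothing (the 'return ValueError' only ends
-- the generator), so both ports return [] there.

-- ===== PORT A =====
-- for i in range(n+1): if i%3==0: yield i elif i%4==0: yield i
def Divisible (n : Int) : List Int :=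
  if n < 0 then []
  else
    (PySem.List.pyRange 0 (n + 1) 1).foldl
      (fun acc i =>
        if PySem.Int.mod i 3 == 0 then acc ++ [i]
        else if PySem.Int.mod i 4 == 0 then acc ++ [i]
        else acc) []

-- ===== PORT B =====
-- while a <= n or b <= n: merge the two streams of multiples, deduplicating ties
-- (fuel = a bound on the number of iterations, only to make the loop structurally total)
def DivisibleLoop (n : Int) : Nat → Int → Int → List Int
  | 0, _, _ => []
  | fuel + 1, a, b =>
    if a ≤ n ∨ b ≤ n then
      if a = b then a :: DivisibleLoop n fuel (a + 3) (b + 4)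
      else if a < b then a :: DivisibleLoop n fuel (a + 3) b
      else b :: DivisibleLoop n fuel a (b + 4)
    else []

def Divisible_alt (n : Int) : List Int :=
  if n < 0 then []
  else DivisibleLoop n (2 * (n.toNat + 1)) 0 0

-- ===== PRECONDITION & SPEC =====
def Spec_Divisible (n : Int) (out : List Int) : Prop := out = Divisible_alt n
instance (n : Int) (out : List Int) : Decidable (Spec_Divisible n out) := by unfold Spec_Divisible; infer_instance

-- ===== CLAIM (what is proved, stated in full; the proofs are below) =====
def Claim_equal_Divisible : Prop := ∀ (n : Int), Dom_Divisible n → Spec_Divisible n (Divisible n)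

-- ===== LEMMAS AND PROOFS =====

-- the yield test of A, as one predicate
def divP (i : Int) : Bool := PySem.Int.mod i 3 == 0 || PySem.Int.mod i 4 == 0

-- a stretch of consecutive integers on which divP is false may be dropped in front
lemma filter_gap (t m m' : Int) (h : m ≤ m')
    (hq : ∀ i, m ≤ i → i < m' → divP i = false) :
    (PySem.List.pyRange m t 1).filter divP = (PySem.List.pyRange m' t 1).filter divP := by
  by_cases hm : m' ≤ t
  · rw [PySem.List.pyRange_one_append m m' t h hm, List.filter_append]
    have hnil : (PySem.List.pyRange m m' 1).filter divP = [] := by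
      apply List.filter_eq_nil_iff.mpr
      intro i hi
      have hmem := (PySem.List.mem_pyRange_one).mp hi
      simp [hq i hmem.1 hmem.2]
    simp [hnil]
  · rw [PySem.List.pyRange_one_eq_nil (a := m') (b := t) (by omega)]
    rw [List.filter_nil]
    apply List.filter_eq_nil_iff.mpr
    intro i hi
    have hmem := (PySem.List.mem_pyRange_one).mp hi
    simp [hq i hmem.1 (by omega)]

-- characterisation of B's merge loop on its reachable states, given enough fuel
lemma loop_eq (n : Int) (fuel : Nat) (a b : Int) (h3 : (3 : Int) ∣ a) (h4 : (4 : Int) ∣ b)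
    (hab : a ≤ b + 3 ∧ b ≤ a + 3)
    (hf : (n + 1 - a).toNat + (n + 1 - b).toNat ≤ fuel) :
    DivisibleLoop n fuel a b = (PySem.List.pyRange (min a b) (n + 1) 1).filter divP := by
  induction fuel generalizing a b with
  | zero =>
    rw [DivisibleLoop, PySem.List.pyRange_one_eq_nil (a := min a b) (b := n + 1) (by omega),
      List.filter_nil]
  | succ f ih =>
  rw [DivisibleLoop]
  by_cases hc : a ≤ n ∨ b ≤ n
  · rw [if_pos hc]
    by_cases heq : a = b
    · subst heq
      have han : a ≤ n := by omega
      rw [if_pos rfl]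
      rw [ih (a + 3) (a + 4) (by omega) (by omega) (by omega) (by omega)]
      rw [show min a a = a from by omega, show min (a + 3) (a + 4) = a + 3 from by omega]
      rw [PySem.List.pyRange_one_cons (a := a) (b := n + 1) (by omega)]
      rw [List.filter_cons_of_pos (by simp [divP]; omega)]
      rw [filter_gap (n + 1) (a + 1) (a + 3) (by omega)
        (by intro i h1 h2; rw [← Bool.not_eq_true]; simp [divP]; omega)]
    · by_cases hlt : a < b
      · have han : a ≤ n := by omega
        rw [if_neg heq, if_pos hlt]
        rw [ih (a + 3) b (by omega) h4 (by omega) (by omega)]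
        rw [show min a b = a from by omega]
        rw [PySem.List.pyRange_one_cons (a := a) (b := n + 1) (by omega)]
        rw [List.filter_cons_of_pos (by simp [divP]; omega)]
        rw [filter_gap (n + 1) (a + 1) (min (a + 3) b) (by omega)
          (by intro i h1 h2; rw [← Bool.not_eq_true]; simp [divP]; omega)]
      · have hba : b < a := by omega
        have hbn : b ≤ n := by omega
        rw [if_neg heq, if_neg hlt]
        rw [ih a (b + 4) h3 (by omega) (by omega) (by omega)]
        rw [show min a b = b from by omega]
        rw [PySem.List.pyRange_one_cons (a := b) (b := n + 1) (by omega)]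
        rw [List.filter_cons_of_pos (by simp [divP]; omega)]
        rw [filter_gap (n + 1) (b + 1) (min a (b + 4)) (by omega)
          (by intro i h1 h2; rw [← Bool.not_eq_true]; simp [divP]; omega)]
  · rw [if_neg hc]
    rw [PySem.List.pyRange_one_eq_nil (a := min a b) (b := n + 1) (by omega), List.filter_nil]

-- A's fold is the filter of the range
lemma portA_eq_filter (n : Int) (h : ¬ n < 0) :
    Divisible n = (PySem.List.pyRange 0 (n + 1) 1).filter divP := by
  rw [Divisible, if_neg h]
  have hfun : (fun (acc : List Int) (i : Int) =>
      if PySem.Int.mod i 3 == 0 then acc ++ [i]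
      else if PySem.Int.mod i 4 == 0 then acc ++ [i]
      else acc) =
      (fun acc i => if divP i then acc ++ [i] else acc) := by
    funext acc i
    by_cases hd3 : (3 : Int) ∣ i <;> by_cases hd4 : (4 : Int) ∣ i <;>
      simp [divP, hd3, hd4]
  rw [hfun, PySem.List.foldl_append_if_eq_filter]
  simp

-- ===== VERDICT (by name: the statement is the Claim_ definition above) =====
theorem Divisible_spec : Claim_equal_Divisible := by
  intro n _
  unfold Spec_Divisible Divisible_alt
  by_cases hn : n < 0
  · rw [if_pos hn, Divisible, if_pos hn]
  · rw [if_neg hn, portA_eq_filter n hn,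
      loop_eq n (2 * (n.toNat + 1)) 0 0 ⟨0, by ring⟩ ⟨0, by ring⟩ (by omega) (by omega)]
    norm_num
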